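-- pv_equiv track=rewrite | github.com/JeongGod/Algo-study | leehyowonzero/5week/92334.py | solution
-- ===== SOURCE A (Python) =====
-- from collections import defaultdict
--
-- def solution(id_list, report, k):
--     answer = defaultdict(int) # 정답 딕트 만들기
--     for el in id_list:
--         answer[el] = 0
--
--     reported_id_list = defaultdict(set) # 신고당한 아이디 리스트 초기화 및 갱신, 중복 신고를 막기위해 key값은 set자료구조로 저장
--     for case in report:
--         fm, to = case.split(' ')
--         reported_id_list[to] |= {fm}
--
--     for reported_id  in reported_id_list: # 조건이 만족되면 정답 딕트에 적용
--         if(len(reported_id_list[reported_id]) >= k):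
--             for el in reported_id_list[reported_id]:
--                 answer[el] += 1
--     return list(answer.values())
-- ===== SOURCE B (Python) =====
-- from collections import Counter
--
--
-- def solution(id_list, report, k):
--     # Unique (reporter, target) pairs, in first-occurrence order.
--     pairs = []
--     seen = set()
--     for case in report:
--         fm, to = case.split(' ')
--         if (fm, to) not in seen:
--             seen.add((fm, to))
--             pairs.append((fm, to))
--     # A target is banned when it has at least k distinct reporters.
--     counts = Counter(to for fm, to in pairs)
--     banned = {to for to in counts if counts[to] >= k}
--     # One pass over the unique pairs credits each reporter of a banned target.
--     answer = {el: 0 for el in id_list}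
--     for fm, to in pairs:
--         if to in banned:
--             answer[fm] += 1
--     return list(answer.values())
-- ===== Notes on version B (the rewrite author's own statement) =====
-- stated objective: alternative
-- what changed: Instead of grouping reporters into a per-target defaultdict of sets and running a nested loop over targets then set members, B dedupes the reports into a chronological list of unique (reporter, target) pairs, derives banned targets from a Counter of that list, and credits reporters in one flat pass over the unique pairs.
-- outside the precondition, e.g. on solution(['a'], ['x a'], 1): A returns [0, 1], B raises KeyError
import Mathlib
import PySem

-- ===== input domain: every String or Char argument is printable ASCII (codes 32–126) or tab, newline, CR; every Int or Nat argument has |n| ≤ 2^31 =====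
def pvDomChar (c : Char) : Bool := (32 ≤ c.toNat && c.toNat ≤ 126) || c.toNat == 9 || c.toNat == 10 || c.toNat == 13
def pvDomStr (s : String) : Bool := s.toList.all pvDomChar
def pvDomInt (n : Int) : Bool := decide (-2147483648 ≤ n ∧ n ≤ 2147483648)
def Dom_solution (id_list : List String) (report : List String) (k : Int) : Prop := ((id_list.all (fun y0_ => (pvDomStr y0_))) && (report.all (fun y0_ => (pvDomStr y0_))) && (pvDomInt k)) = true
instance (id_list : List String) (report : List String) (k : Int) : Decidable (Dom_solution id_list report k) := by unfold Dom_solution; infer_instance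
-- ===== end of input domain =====

-- B restructures A: it dedupes reports into a chronological list of unique (reporter, target)
-- pairs, derives the banned targets from a Counter of that list, and credits reporters in one
-- flat pass, instead of A's per-target defaultdict of reporter sets with a nested loop.

-- ===== PORT A =====
-- shared parse helper: `fm, to = case.split(' ')`; none = the unpacking raises ValueError
def parseCase (case_ : String) : Option (String × String) :=
  match PySem.Str.split? case_ " " with
  | some [fm, tg] => some (fm, tg)
  | _ => none

def solution (id_list : List String) (report : List String) (k : Int) : List Int :=
  -- answer = defaultdict(int); for el in id_list: answer[el] = 0
  let answer0 : PySem.Dict String Int :=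
    id_list.foldl (fun d el => d.insert el 0) PySem.Dict.empty
  -- reported_id_list = defaultdict(set); for case in report: fm, to = case.split(' '); reported_id_list[to] |= {fm}
  let reported : PySem.Dict String (PySem.Set String) :=
    report.foldl (fun d case_ =>
      match parseCase case_ with
      | some (fm, tg) => d.insert tg (PySem.Set.add (d.getD tg PySem.Set.empty) fm)
      | none => d) PySem.Dict.empty
  -- for reported_id in reported_id_list: if len(...) >= k: for el in ...: answer[el] += 1
  -- (the inner `for el` iterates a Python set; under Pre_ every el is already a key of answer,
  --  so the result does not depend on that iteration order and the Set's insertion order is exact)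
  let answer : PySem.Dict String Int :=
    reported.keys.foldl (fun a rid =>
      let s := reported.getD rid PySem.Set.empty
      if k ≤ (s.length : Int) then s.foldl (fun a el => a.modify el 0 (· + 1)) a else a) answer0
  answer.values

-- ===== PORT B =====
def solution_alt (id_list : List String) (report : List String) (k : Int) : List Int :=
  -- the seen-set/append loop keeps the first occurrence of each pair, i.e. dedup
  let pairs : List (String × String) := PySem.List.dedup (report.filterMap parseCase)
  -- counts = Counter(to for fm, to in pairs)
  let counts : PySem.Dict String Int := PySem.Dict.counter (pairs.map Prod.snd)
  -- banned = {to for to in counts if counts[to] >= k}   (used only for membership)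
  let banned : PySem.Set String := counts.keys.filter (fun t => k ≤ counts.getD t 0)
  -- answer = {el: 0 for el in id_list}
  let answer0 : PySem.Dict String Int :=
    id_list.foldl (fun d el => d.insert el 0) PySem.Dict.empty
  -- for fm, to in pairs: if to in banned: answer[fm] += 1   (under Pre_ fm is already a key)
  let answer : PySem.Dict String Int :=
    pairs.foldl (fun a p => if banned.contains p.2 then a.modify p.1 0 (· + 1) else a) answer0
  answer.values

-- ===== PRECONDITION & SPEC =====
-- Pre_ excludes (i) report entries that do not split into exactly two fields, on which A raises
-- ValueError, and (ii) inputs where a banned target (>= k distinct reporters) was reported by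
-- someone outside id_list: there A appends extra answer keys in an order inherited from iterating
-- a Python set (hash order), an accident of A's implementation (B's natural dict raises KeyError).
def Pre_solution (id_list : List String) (report : List String) (k : Int) : Prop :=
  (∀ case_ ∈ report, (parseCase case_).isSome = true) ∧
  (∀ p ∈ report.filterMap parseCase,
    k ≤ ((((PySem.Set.ofList (report.filterMap parseCase)).map Prod.snd).count p.2 : Nat) : Int) →
    id_list.contains p.1 = true)
instance (id_list : List String) (report : List String) (k : Int) : Decidable (Pre_solution id_list report k) := by unfold Pre_solution; infer_instance

def pvWitness_solution : List String × List String × Int :=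
  (["muzi", "frodo", "apeach", "neo"],
   ["muzi frodo", "apeach frodo", "frodo neo", "muzi neo", "apeach muzi"], 2)

def Spec_solution (id_list : List String) (report : List String) (k : Int) (out : List Int) : Prop := out = solution_alt id_list report k
instance (id_list : List String) (report : List String) (k : Int) (out : List Int) : Decidable (Spec_solution id_list report k out) := by unfold Spec_solution; infer_instance

-- ===== CLAIM (what is proved, stated in full; the proofs are below) =====
def Claim_equal_solution : Prop := ∀ (id_list : List String) (report : List String) (k : Int), Dom_solution id_list report k → Pre_solution id_list report k → Spec_solution id_list report k (solution id_list report k)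

-- ===== LEMMAS AND PROOFS =====

-- `answer[el] += 1` over a list of keys
def bump (L : List String) (d : PySem.Dict String Int) : PySem.Dict String Int :=
  L.foldl (fun a el => a.modify el 0 (· + 1)) d

-- the update step of A's report loop, on an already-parsed pair
def stepA (d : PySem.Dict String (PySem.Set String)) (p : String × String) :
    PySem.Dict String (PySem.Set String) :=
  d.insert p.2 (PySem.Set.add (d.getD p.2 PySem.Set.empty) p.1)

theorem bump_eq_foldl (L : List String) (d : PySem.Dict String Int) :
    L.foldl (fun a el => a.modify el 0 (· + 1)) d = bump L d := rfl

theorem bump_getD (L : List String) (d : PySem.Dict String Int) (x : String) :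
    (bump L d).getD x 0 = d.getD x 0 + (L.count x : Int) := by
  induction L generalizing d with
  | nil => simp [bump]
  | cons e L ih =>
      simp only [bump, List.foldl_cons] at *
      rw [ih, PySem.Dict.getD_modify, List.count_cons]
      by_cases hx : x = e
      · simp [hx]; ring
      · simp [hx, Ne.symm hx]

theorem bump_keys (L : List String) (d : PySem.Dict String Int)
    (h : ∀ e ∈ L, d.contains e = true) : (bump L d).keys = d.keys := by
  induction L generalizing d with
  | nil => simp [bump]
  | cons e L ih =>
      simp only [bump, List.foldl_cons] at *
      rw [ih, PySem.Dict.keys_modify, PySem.Dict.keys_insert_of_contains _ _ (h e (by simp))]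
      intro e' he'
      rw [PySem.Dict.contains_modify]
      simp [h e' (List.mem_cons_of_mem _ he')]

theorem values_eq_map_getD (d : PySem.Dict String Int) (h : d.keys.Nodup) :
    d.values = d.keys.map (fun x => d.getD x 0) := by
  show d.items.map (fun p => p.2) = (d.items.map (fun p => p.1)).map (fun x => d.getD x 0)
  rw [List.map_map]
  refine List.map_congr_left (fun p hp => ?_)
  exact (PySem.Dict.getD_of_mem_items d (k := p.1) (v := p.2) (by simpa using hp) h 0).symm

-- the `answer[el] = 0` initialisation loop
theorem init0_contains (l : List String) (d : PySem.Dict String Int) (x : String) :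
    (l.foldl (fun d el => d.insert el 0) d).contains x = (l.contains x || d.contains x) := by
  induction l generalizing d with
  | nil => simp
  | cons e l ih =>
      simp only [List.foldl_cons]
      rw [ih, PySem.Dict.contains_insert]
      by_cases hx : x = e
      · simp [hx]
      · simp only [List.contains_cons]
        have h1 : (x == e) = false := by simpa using hx
        have h2 : (e == x) = false := by simpa using Ne.symm hx
        simp [h1]

theorem init0_nodup (l : List String) (d : PySem.Dict String Int) (h : d.keys.Nodup) :
    (l.foldl (fun d el => d.insert el 0) d).keys.Nodup := by
  induction l generalizing d with
  | nil => simpa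
  | cons e l ih => exact ih _ (PySem.Dict.nodup_keys_insert _ _ _ h)

-- A's report loop equals a fold of stepA over the parsed pairs
theorem foldA_eq (report : List String) (d : PySem.Dict String (PySem.Set String)) :
    report.foldl (fun d case_ =>
      match parseCase case_ with
      | some (fm, tg) => d.insert tg (PySem.Set.add (d.getD tg PySem.Set.empty) fm)
      | none => d) d = (report.filterMap parseCase).foldl stepA d := by
  induction report generalizing d with
  | nil => simp
  | cons c report ih =>
      simp only [List.foldl_cons, List.filterMap_cons]
      cases hc : parseCase c with
      | none => exact ih d
      | some p =>
          cases p with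
          | mk fm tg => exact ih _

theorem RgetD (P : List (String × String)) (d : PySem.Dict String (PySem.Set String)) (t : String) :
    (P.foldl stepA d).getD t PySem.Set.empty =
      ((P.filter (fun p => p.2 == t)).map Prod.fst).foldl PySem.Set.add (d.getD t PySem.Set.empty) := by
  induction P generalizing d with
  | nil => simp
  | cons p P ih =>
      simp only [List.foldl_cons, List.filter_cons]
      rw [ih]
      by_cases hp : p.2 = t
      · simp [hp, stepA]
      · have : (p.2 == t) = false := by simpa using hp
        simp [this, stepA, PySem.Dict.getD_insert, Ne.symm hp]

theorem Rcontains (P : List (String × String)) (d : PySem.Dict String (PySem.Set String)) (t : String) :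
    (P.foldl stepA d).contains t = ((P.map Prod.snd).contains t || d.contains t) := by
  induction P generalizing d with
  | nil => simp
  | cons p P ih =>
      simp only [List.foldl_cons, List.map_cons]
      rw [ih, stepA, PySem.Dict.contains_insert]
      by_cases hp : t = p.2
      · simp [hp]
      · simp only [List.contains_cons]
        have h1 : (t == p.2) = false := by simpa using hp
        have h2 : (p.2 == t) = false := by simpa using Ne.symm hp
        simp [h1]

theorem Rnodup (P : List (String × String)) (d : PySem.Dict String (PySem.Set String))
    (h : d.keys.Nodup) : (P.foldl stepA d).keys.Nodup := by
  induction P generalizing d with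
  | nil => simpa
  | cons p P ih => exact ih _ (PySem.Dict.nodup_keys_insert _ _ _ h)

theorem flattenA (ks : List String) (g : String → List String) (c : String → Prop)
    [DecidablePred c] (a : PySem.Dict String Int) :
    ks.foldl (fun a x => if c x then bump (g x) a else a) a
      = bump (ks.flatMap fun x => if c x then g x else []) a := by
  induction ks generalizing a with
  | nil => simp [bump]
  | cons t ks ih =>
      simp only [List.foldl_cons, List.flatMap_cons]
      rw [ih]
      by_cases ht : c t
      · simp only [ht, if_pos, bump, List.foldl_append]
      · simp [ht, bump]

theorem flattenB (l : List (String × String)) (c : String × String → Bool)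
    (a : PySem.Dict String Int) :
    l.foldl (fun a p => if c p then a.modify p.1 0 (· + 1) else a) a
      = bump ((l.filter c).map Prod.fst) a := by
  induction l generalizing a with
  | nil => simp [bump]
  | cons p l ih =>
      simp only [List.foldl_cons, List.filter_cons]
      by_cases hp : c p
      · simp only [hp, if_pos, ih, List.map_cons, bump, List.foldl_cons]
      · simp [hp, ih]

theorem ofList_append_singleton {α : Type} [BEq α] (xs : List α) (x : α) :
    PySem.Set.ofList (xs ++ [x]) = PySem.Set.add (PySem.Set.ofList xs) x := by
  simp [PySem.Set.ofList, List.foldl_append]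

theorem ofList_filter {α : Type} [BEq α] [LawfulBEq α] (g : α → Bool) (xs : List α) :
    PySem.Set.ofList (xs.filter g) = (PySem.Set.ofList xs).filter g := by
  induction xs using List.reverseRecOn with
  | nil => simp [PySem.Set.ofList, PySem.Set.empty]
  | append_singleton xs x ih =>
      rw [List.filter_append, ofList_append_singleton]
      by_cases hx : g x = true
      · rw [show List.filter g [x] = [x] from by simp [hx], ofList_append_singleton, ih]
        have h1 : PySem.Set.contains ((PySem.Set.ofList xs).filter g) x
            = PySem.Set.contains (PySem.Set.ofList xs) x := by
          by_cases hm : x ∈ PySem.Set.ofList xs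
          · have h2 : x ∈ (PySem.Set.ofList xs).filter g := List.mem_filter.mpr ⟨hm, hx⟩
            rw [(PySem.Set.contains_iff _ _).mpr h2, (PySem.Set.contains_iff _ _).mpr hm]
          · have h2 : x ∉ (PySem.Set.ofList xs).filter g := fun hc => hm (List.mem_filter.mp hc).1
            have e1 : PySem.Set.contains ((PySem.Set.ofList xs).filter g) x = false := by
              by_contra hh
              exact h2 ((PySem.Set.contains_iff _ _).mp (by simpa using hh))
            have e2 : PySem.Set.contains (PySem.Set.ofList xs) x = false := by
              by_contra hh
              exact hm ((PySem.Set.contains_iff _ _).mp (by simpa using hh))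
            rw [e1, e2]
        rw [PySem.Set.add, PySem.Set.add, h1]
        by_cases hm : PySem.Set.contains (PySem.Set.ofList xs) x = true
        · rw [if_pos hm, if_pos hm]
        · rw [if_neg hm, if_neg hm, List.filter_append]
          simp [hx]
      · have hx' : g x = false := by simpa using hx
        rw [show List.filter g [x] = [] from by simp [hx'], List.append_nil, ih, PySem.Set.add]
        by_cases hm : PySem.Set.contains (PySem.Set.ofList xs) x = true
        · rw [if_pos hm]
        · rw [if_neg hm, List.filter_append]
          simp [hx']

theorem ofList_map_fst (l : List (String × String)) (t : String)
    (h : ∀ p ∈ l, p.2 = t) :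
    PySem.Set.ofList (l.map Prod.fst) = (PySem.Set.ofList l).map Prod.fst := by
  induction l using List.reverseRecOn with
  | nil => simp [PySem.Set.ofList, PySem.Set.empty]
  | append_singleton l p ih =>
      have hl : ∀ q ∈ l, q.2 = t := fun q hq => h q (List.mem_append_left _ hq)
      rw [List.map_append, List.map_cons, List.map_nil, ofList_append_singleton,
        ofList_append_singleton, ih hl]
      have hmem : PySem.Set.contains ((PySem.Set.ofList l).map Prod.fst) p.1
          = PySem.Set.contains (PySem.Set.ofList l) p := by
        by_cases hm : p ∈ PySem.Set.ofList l
        · have h2 : p.1 ∈ (PySem.Set.ofList l).map Prod.fst := List.mem_map_of_mem hm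
          rw [(PySem.Set.contains_iff _ _).mpr h2, (PySem.Set.contains_iff _ _).mpr hm]
        · have h2 : p.1 ∉ (PySem.Set.ofList l).map Prod.fst := by
            intro hc
            rcases List.mem_map.mp hc with ⟨q, hq, hq1⟩
            have hq2 : q.2 = p.2 := by
              rw [hl q (by rwa [PySem.Set.mem_ofList] at hq), h p (by simp)]
            exact hm ((Prod.ext hq1 hq2) ▸ hq)
          have e1 : PySem.Set.contains ((PySem.Set.ofList l).map Prod.fst) p.1 = false := by
            by_contra hh
            exact h2 ((PySem.Set.contains_iff _ _).mp (by simpa using hh))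
          have e2 : PySem.Set.contains (PySem.Set.ofList l) p = false := by
            by_contra hh
            exact hm ((PySem.Set.contains_iff _ _).mp (by simpa using hh))
          rw [e1, e2]
      rw [PySem.Set.add, PySem.Set.add, hmem]
      by_cases hm : PySem.Set.contains (PySem.Set.ofList l) p = true
      · rw [if_pos hm, if_pos hm]
      · rw [if_neg hm, if_neg hm, List.map_append, List.map_cons, List.map_nil]

theorem countP_beq_of_nodup (ks : List String) (v : String)
    (hn : ks.Nodup) (hm : v ∈ ks) : ks.countP (fun t => v == t) = 1 := by
  induction ks with
  | nil => simp at hm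
  | cons a ks ih =>
      rw [List.countP_cons]
      rcases List.mem_cons.mp hm with h | h
      · subst h
        have : v ∉ ks := (List.nodup_cons.mp hn).1
        have : ks.countP (fun t => v == t) = 0 :=
          List.countP_eq_zero.mpr (fun t ht => by simp; rintro rfl; exact this ht)
        simp [this]
      · have hna : v ≠ a := by rintro rfl; exact (List.nodup_cons.mp hn).1 h
        rw [ih (List.nodup_cons.mp hn).2 h]
        simp [hna]

theorem sum_indicator (ks : List String) (v : String) :
    (ks.map (fun t => if (v == t) = true then 1 else 0)).sum = ks.countP (fun t => v == t) := by
  induction ks with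
  | nil => simp
  | cons a ks ih => rw [List.map_cons, List.sum_cons, ih, List.countP_cons]; omega

theorem bridge (l : List (String × String)) (ks : List String) (q : String × String → Bool)
    (hn : ks.Nodup) (hs : ∀ p ∈ l, p.2 ∈ ks) :
    l.countP q = (ks.map (fun t => l.countP (fun p => q p && p.2 == t))).sum := by
  induction l with
  | nil => simp
  | cons p l ih =>
      have hrec := ih (fun p hp => hs p (List.mem_cons_of_mem _ hp))
      simp only [List.countP_cons]
      have : (ks.map (fun t => l.countP (fun p' => q p' && p'.2 == t) +
          if (q p && p.2 == t) = true then 1 else 0)).sum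
          = (ks.map (fun t => l.countP (fun p' => q p' && p'.2 == t))).sum +
            (ks.map (fun t => if (q p && p.2 == t) = true then 1 else 0)).sum := by
        rw [← List.sum_map_add]
      rw [this, ← hrec]
      congr 1
      by_cases hq : q p
      · simp only [hq, Bool.true_and, if_pos]
        rw [sum_indicator, countP_beq_of_nodup ks p.2 hn (hs p (List.mem_cons_self))]
      · simp [hq]

-- the per-target reporter group that A accumulates
def grp (P : List (String × String)) (t : String) : PySem.Set String :=
  PySem.Set.ofList ((P.filter (fun p => p.2 == t)).map Prod.fst)

theorem RgetD_empty (P : List (String × String)) (t : String) :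
    (P.foldl stepA PySem.Dict.empty).getD t PySem.Set.empty = grp P t := by
  rw [RgetD, PySem.Dict.getD_empty]; rfl

theorem grp_count (P : List (String × String)) (t x : String) :
    (grp P t).count x = (PySem.Set.ofList P).countP (fun p => p.1 == x && p.2 == t) := by
  rw [grp, ofList_map_fst _ t (fun p hp => by simpa using (List.mem_filter.mp hp).2),
    ofList_filter, List.count_eq_countP, List.countP_map, List.countP_filter]
  rfl

theorem grp_length (P : List (String × String)) (t : String) :
    (grp P t).length = ((PySem.Set.ofList P).map Prod.snd).count t := by
  rw [grp, ofList_map_fst _ t (fun p hp => by simpa using (List.mem_filter.mp hp).2),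
    ofList_filter, List.length_map, List.count_eq_countP, List.countP_map,
    List.countP_eq_length_filter]
  rfl

-- the central count identity: A's target-grouped traversal and B's flat pass over the
-- unique pairs credit every reporter the same number of times
theorem count_core (P : List (String × String)) (k : Int) (x : String) :
    ((P.foldl stepA PySem.Dict.empty).keys.flatMap
        (fun t => if k ≤ (((P.foldl stepA PySem.Dict.empty).getD t PySem.Set.empty).length : Int)
                  then (P.foldl stepA PySem.Dict.empty).getD t PySem.Set.empty else [])).count x
    = (((PySem.Set.ofList P).filter
          (fun p => PySem.Set.contains ((PySem.Dict.counter ((PySem.Set.ofList P).map Prod.snd)).keys.filter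
              (fun t => k ≤ (PySem.Dict.counter ((PySem.Set.ofList P).map Prod.snd)).getD t 0)) p.2)).map
        Prod.fst).count x := by
  have hB : (((PySem.Set.ofList P).filter
          (fun p => PySem.Set.contains ((PySem.Dict.counter ((PySem.Set.ofList P).map Prod.snd)).keys.filter
              (fun t => k ≤ (PySem.Dict.counter ((PySem.Set.ofList P).map Prod.snd)).getD t 0)) p.2)).map
        Prod.fst).count x
      = (PySem.Set.ofList P).countP
          (fun p => p.1 == x && decide (k ≤ ((((PySem.Set.ofList P).map Prod.snd).count p.2 : Nat) : Int))) := by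
    rw [List.count_eq_countP, List.countP_map, List.countP_filter]
    refine List.countP_congr (fun p hp => ?_)
    have hp2 : p.2 ∈ (PySem.Set.ofList P).map Prod.snd := List.mem_map_of_mem hp
    simp [Function.comp, List.mem_filter, PySem.Dict.keys_counter,
      PySem.Set.mem_ofList, PySem.Dict.getD_counter, hp2]
  rw [hB, List.count_flatMap]
  have hkn : (P.foldl stepA PySem.Dict.empty).keys.Nodup := Rnodup _ _ (by simp)
  have hks : ∀ p ∈ PySem.Set.ofList P, p.2 ∈ (P.foldl stepA PySem.Dict.empty).keys := by
    intro p hp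
    have hmem : p ∈ P := (PySem.Set.mem_ofList _ _).mp hp
    have h2 : (P.map Prod.snd).contains p.2 = true :=
      List.contains_iff_mem.mpr (List.mem_map_of_mem hmem)
    have hc : (P.foldl stepA PySem.Dict.empty).contains p.2 = true := by
      rw [Rcontains, h2]; simp
    exact (PySem.Dict.contains_iff_mem_keys _ _).mp hc
  rw [bridge (PySem.Set.ofList P) _ _ hkn hks]
  refine (congrArg List.sum (List.map_congr_left (fun t ht => ?_))).symm
  show List.countP _ _ = (List.count x ∘ _) t
  rw [Function.comp_apply]
  refine Eq.symm ?_
  simp only [RgetD_empty]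
  by_cases hk : k ≤ ((((PySem.Set.ofList P).map Prod.snd).count t : Nat) : Int)
  · rw [if_pos (by rw [grp_length]; exact hk), grp_count]
    refine (List.countP_congr fun p hp => ?_).symm
    by_cases h2 : p.2 = t
    · rw [h2]; simp [hk]
    · have hb : (p.2 == t) = false := by simpa using h2
      simp [hb]
  · rw [if_neg (by rw [grp_length]; exact hk), List.count_nil]
    refine (List.countP_eq_zero.mpr fun p hp => ?_).symm
    by_cases h2 : p.2 = t
    · rw [h2]; simp [hk]
    · have hb : (p.2 == t) = false := by simpa using h2
      simp [hb]

-- ===== VERDICT (by name: the statement is the Claim_ definition above) =====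
theorem solution_spec : Claim_equal_solution := by
  intro id_list report k hdom hpre
  show solution id_list report k = solution_alt id_list report k
  simp only [solution, solution_alt, foldA_eq, bump_eq_foldl]
  rw [PySem.List.dedup_eq_ofList, flattenA, flattenB]
  have hfst : ∀ p ∈ report.filterMap parseCase,
      k ≤ ((((PySem.Set.ofList (report.filterMap parseCase)).map Prod.snd).count p.2 : Nat) : Int) →
      id_list.contains p.1 = true := hpre.2
  have hcont : ∀ e : String, id_list.contains e = true →
      (id_list.foldl (fun d el => d.insert el 0) (PySem.Dict.empty : PySem.Dict String Int)).contains e = true := by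
    intro e he
    rw [init0_contains, he]
    simp
  have hsubA : ∀ e ∈ (((report.filterMap parseCase).foldl stepA PySem.Dict.empty).keys.flatMap
      (fun t => if k ≤ ((((report.filterMap parseCase).foldl stepA PySem.Dict.empty).getD t PySem.Set.empty).length : Int)
                then ((report.filterMap parseCase).foldl stepA PySem.Dict.empty).getD t PySem.Set.empty else [])),
      (id_list.foldl (fun d el => d.insert el 0) (PySem.Dict.empty : PySem.Dict String Int)).contains e = true := by
    intro e he
    rcases List.mem_flatMap.mp he with ⟨t, _, hmem⟩
    rw [RgetD_empty] at hmem
    by_cases hc : k ≤ ((grp (report.filterMap parseCase) t).length : Int)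
    · have hg : e ∈ grp (report.filterMap parseCase) t := by simpa [hc] using hmem
      rw [grp, PySem.Set.mem_ofList] at hg
      rcases List.mem_map.mp hg with ⟨p, hp, hp1⟩
      have hp2 : p.2 = t := by simpa using (List.mem_filter.mp hp).2
      have hcnt : k ≤ ((((PySem.Set.ofList (report.filterMap parseCase)).map Prod.snd).count p.2 : Nat) : Int) := by
        rw [hp2]
        rw [grp_length] at hc
        exact_mod_cast hc
      exact hcont e (hp1 ▸ hfst p (List.mem_filter.mp hp).1 hcnt)
    · simp [hc] at hmem
  have hsubB : ∀ e ∈ (((PySem.Set.ofList (report.filterMap parseCase)).filter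
      (fun p => PySem.Set.contains
        ((PySem.Dict.counter ((PySem.Set.ofList (report.filterMap parseCase)).map Prod.snd)).keys.filter
          (fun t => k ≤ (PySem.Dict.counter ((PySem.Set.ofList (report.filterMap parseCase)).map Prod.snd)).getD t 0))
        p.2)).map Prod.fst),
      (id_list.foldl (fun d el => d.insert el 0) (PySem.Dict.empty : PySem.Dict String Int)).contains e = true := by
    intro e he
    rcases List.mem_map.mp he with ⟨p, hp, hp1⟩
    have hpP : p ∈ report.filterMap parseCase :=
      (PySem.Set.mem_ofList _ _).mp (List.mem_filter.mp hp).1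
    have hb : PySem.Set.contains
        ((PySem.Dict.counter ((PySem.Set.ofList (report.filterMap parseCase)).map Prod.snd)).keys.filter
          (fun t => k ≤ (PySem.Dict.counter ((PySem.Set.ofList (report.filterMap parseCase)).map Prod.snd)).getD t 0))
        p.2 = true := by simpa using (List.mem_filter.mp hp).2
    have hmem := (PySem.Set.contains_iff _ _).mp hb
    have hk := (List.mem_filter.mp hmem).2
    rw [PySem.Dict.getD_counter] at hk
    exact hcont e (hp1 ▸ hfst p hpP (by simpa using hk))
  have ha0n : (id_list.foldl (fun d el => d.insert el 0) (PySem.Dict.empty : PySem.Dict String Int)).keys.Nodup :=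
    init0_nodup _ _ (by simp)
  rw [values_eq_map_getD _ (by rw [bump_keys _ _ hsubA]; exact ha0n), bump_keys _ _ hsubA,
    values_eq_map_getD _ (by rw [bump_keys _ _ hsubB]; exact ha0n), bump_keys _ _ hsubB]
  exact List.map_congr_left (fun x hx => by rw [bump_getD, bump_getD, count_core])
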